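-- pv_equiv track=rewrite | github.com/aditya-kumar15079/POCs | electron-test-runner/Test-Foundry/TestFoundry_Framework/src/ai_clients/azure_openai_client.py | _parse_test_cases
-- ===== SOURCE A (Python) =====
-- from typing import List, Dict, Any, Optional
--
-- def _parse_test_cases(response: str, test_type: str) -> List[Dict[str, Any]]:
--     """Parse test cases from API response
--
--     Args:
--         response: Raw API response
--         test_type: Type of test case
--
--     Returns:
--         List of parsed test cases
--     """
--     test_cases = []
--     lines = response.strip().split('\n')
--
--     current_case = {}
--     current_field = ""
--
--     for line in lines:
--         line = line.strip()
--         if not line: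
--             continue
--
--         # Check for test case markers
--         if line.startswith(('Test Case', 'Case', 'Scenario')):
--             # Save previous case if exists
--             if current_case:
--                 current_case['test_type'] = test_type
--                 test_cases.append(current_case)
--
--             # Start new case
--             current_case = {'title': line}
--             current_field = ""
--
--         # Check for field markers
--         elif ':' in line:
--             field_name, field_value = line.split(':', 1)
--             field_name = field_name.strip().lower()
--             field_value = field_value.strip()
--
--             if field_name in ['input', 'question', 'prompt']:
--                 current_case['input'] = field_value
--                 current_field = 'input'
--             elif field_name in ['expected', 'expected_output', 'answer']:
--                 current_case['expected'] = field_value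
--                 current_field = 'expected'
--             elif field_name in ['description', 'rationale', 'explanation']:
--                 current_case['description'] = field_value
--                 current_field = 'description'
--
--         # Continue building current field
--         elif current_field and current_case:
--             if current_field not in current_case:
--                 current_case[current_field] = ""
--             current_case[current_field] += " " + line
--
--     # Add last test case
--     if current_case:
--         current_case['test_type'] = test_type
--         test_cases.append(current_case)
--
--     return test_cases
-- ===== SOURCE B (Python) =====
-- # B: two-phase block decomposition (split lines into marker-delimited blocks, then
-- # build each case recursively) instead of A's single-pass state machine; alternative
-- # decomposition, same cost.
--
-- _MARKERS = ('Test Case', 'Case', 'Scenario')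
-- _FIELD_GROUPS = [('input', ('input', 'question', 'prompt')),
--                  ('expected', ('expected', 'expected_output', 'answer')),
--                  ('description', ('description', 'rationale', 'explanation'))]
--
--
-- def _split_body(lines):
--     """(lines before the first marker line, lines from the first marker on)."""
--     for i, line in enumerate(lines):
--         if line.startswith(_MARKERS):
--             return lines[:i], lines[i:]
--     return lines, []
--
--
-- def _build_case(case, body):
--     field = ""
--     for line in body:
--         if ':' in line:
--             name, value = line.split(':', 1)
--             name = name.strip().lower()
--             for key, names in _FIELD_GROUPS:
--                 if name in names:
--                     case[key] = value.strip()
--                     field = key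
--                     break
--         elif field:
--             case[field] += " " + line
--     return case
--
--
-- def _parse_blocks(lines, test_type):
--     if not lines:
--         return []
--     head, tail = lines[0], lines[1:]
--     body, rest = _split_body(tail)
--     if head.startswith(_MARKERS):
--         case = _build_case({'title': head}, body)
--     else:
--         case = _build_case({}, [head] + body)
--     out = []
--     if case:
--         case['test_type'] = test_type
--         out.append(case)
--     return out + _parse_blocks(rest, test_type)
--
--
-- def _parse_test_cases(response, test_type):
--     lines = [s for s in (raw.strip() for raw in response.strip().split('\n')) if s]
--     return _parse_blocks(lines, test_type)
-- ===== Notes on version B (the rewrite author's own statement) =====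
-- stated objective: alternative
-- what changed: B replaces A's single-pass state machine (one dict/field accumulator flushed at each marker and at the end) by a two-phase block decomposition: it splits the cleaned lines into marker-delimited blocks and builds each case dict per block, recursing over blocks.
import Mathlib
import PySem

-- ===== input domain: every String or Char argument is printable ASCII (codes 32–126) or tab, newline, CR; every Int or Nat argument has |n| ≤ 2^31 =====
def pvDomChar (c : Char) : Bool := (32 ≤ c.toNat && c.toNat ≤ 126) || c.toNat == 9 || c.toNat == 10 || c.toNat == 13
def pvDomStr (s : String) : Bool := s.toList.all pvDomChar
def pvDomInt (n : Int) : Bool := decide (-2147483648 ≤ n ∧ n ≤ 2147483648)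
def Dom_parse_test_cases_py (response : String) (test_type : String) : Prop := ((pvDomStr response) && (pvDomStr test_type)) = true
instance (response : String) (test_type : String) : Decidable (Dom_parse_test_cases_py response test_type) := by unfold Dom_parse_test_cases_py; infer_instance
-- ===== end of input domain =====

-- B replaces A's single-pass state machine by a two-phase block decomposition
-- (split the lines at marker lines, then build each case per block); alternative
-- decomposition, same cost. Both ports work on List Char (PySem.Chars is exact there)
-- and convert each case dict to its items list at the end.

-- ===== PORT A =====
-- state: (test_cases, current_case, current_field)
def pvStateA : Type := List (PySem.Dict (List Char) (List Char)) × PySem.Dict (List Char) (List Char) × List Char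

-- one iteration of A's `for line in lines` body, after `line = line.strip()` and the
-- empty-line `continue` (factored into pvStepA below)
def pvStepACore (tt : List Char) (st : pvStateA) (line : List Char) : pvStateA :=
  let (tcs, cur, fld) := st
  if PySem.Chars.startswith line "Test Case".toList || PySem.Chars.startswith line "Case".toList
      || PySem.Chars.startswith line "Scenario".toList then
    let tcs := if cur.items.isEmpty then tcs else tcs ++ [cur.insert "test_type".toList tt]
    (tcs, (PySem.Dict.empty).insert "title".toList line, [])
  else if PySem.Chars.isIn [':'] line then
    -- line.split(':', 1) has exactly two pieces because ':' is in line
    let parts := PySem.Chars.splitOnMax line [':'] 1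
    let fname := PySem.Chars.lower (PySem.Chars.strip (parts.getD 0 []))
    let fval := PySem.Chars.strip (parts.getD 1 [])
    if ["input".toList, "question".toList, "prompt".toList].contains fname then
      (tcs, cur.insert "input".toList fval, "input".toList)
    else if ["expected".toList, "expected_output".toList, "answer".toList].contains fname then
      (tcs, cur.insert "expected".toList fval, "expected".toList)
    else if ["description".toList, "rationale".toList, "explanation".toList].contains fname then
      (tcs, cur.insert "description".toList fval, "description".toList)
    else (tcs, cur, fld)
  else if fld ≠ [] ∧ ¬ cur.items.isEmpty then
    let cur := if cur.contains fld then cur else cur.insert fld []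
    (tcs, cur.insert fld (cur.getD fld [] ++ ' ' :: line), fld)
  else (tcs, cur, fld)

def pvStepA (tt : List Char) (st : pvStateA) (raw : List Char) : pvStateA :=
  let line := PySem.Chars.strip raw
  if line = [] then st else pvStepACore tt st line

def parse_test_cases_py (response : String) (test_type : String) : List (List (String × String)) :=
  let tt := test_type.toList
  let lines := PySem.Chars.splitOn (PySem.Chars.strip response.toList) ['\n']
  let st := lines.foldl (pvStepA tt) ([], PySem.Dict.empty, [])
  let tcs := if st.2.1.items.isEmpty then st.1 else st.1 ++ [st.2.1.insert "test_type".toList tt]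
  tcs.map (fun d => d.items.map (fun p => (String.mk p.1, String.mk p.2)))

-- ===== PORT B =====
def pvMarkers : List (List Char) := ["Test Case".toList, "Case".toList, "Scenario".toList]

def pvIsMarker (line : List Char) : Bool := pvMarkers.any (fun m => PySem.Chars.startswith line m)

def pvFieldGroups : List (List Char × List (List Char)) :=
  [("input".toList, ["input".toList, "question".toList, "prompt".toList]),
   ("expected".toList, ["expected".toList, "expected_output".toList, "answer".toList]),
   ("description".toList, ["description".toList, "rationale".toList, "explanation".toList])]

-- _split_body: (lines before the first marker line, lines from the first marker on)
def pvSplitBody : List (List Char) → List (List Char) × List (List Char)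
  | [] => ([], [])
  | l :: ls =>
    if pvIsMarker l then ([], l :: ls)
    else
      let (b, r) := pvSplitBody ls
      (l :: b, r)

-- one iteration of _build_case's loop; state (case, field)
def pvBuildStep (st : PySem.Dict (List Char) (List Char) × List Char) (line : List Char) :
    PySem.Dict (List Char) (List Char) × List Char :=
  if PySem.Chars.isIn [':'] line then
    let parts := PySem.Chars.splitOnMax line [':'] 1
    let fname := PySem.Chars.lower (PySem.Chars.strip (parts.getD 0 []))
    match pvFieldGroups.find? (fun g => g.2.contains fname) with
    | some g => (st.1.insert g.1 (PySem.Chars.strip (parts.getD 1 [])), g.1)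
    | none => st
  else if st.2 ≠ [] then
    -- case[field] += " " + line (the key is always present when field is set)
    (st.1.insert st.2 (st.1.getD st.2 [] ++ ' ' :: line), st.2)
  else st

def pvBuildCase (case : PySem.Dict (List Char) (List Char)) (body : List (List Char)) :
    PySem.Dict (List Char) (List Char) :=
  (body.foldl pvBuildStep (case, [])).1

theorem pvSplitBody_rest_le (ls : List (List Char)) : (pvSplitBody ls).2.length ≤ ls.length := by
  induction ls with
  | nil => simp [pvSplitBody]
  | cons l ls ih =>
    simp only [pvSplitBody]
    split
    · simp
    · simpa using Nat.le_succ_of_le ih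

-- _parse_blocks
def pvParseBlocks (tt : List Char) : List (List Char) → List (PySem.Dict (List Char) (List Char))
  | [] => []
  | head :: tail =>
    let br := pvSplitBody tail
    let case :=
      if pvIsMarker head then pvBuildCase ((PySem.Dict.empty).insert "title".toList head) br.1
      else pvBuildCase PySem.Dict.empty (head :: br.1)
    let out := if case.items.isEmpty then [] else [case.insert "test_type".toList tt]
    out ++ pvParseBlocks tt br.2
  termination_by lines => lines.length
  decreasing_by
    simpa using Nat.lt_succ_of_le (pvSplitBody_rest_le tail)

def parse_test_cases_py_alt (response : String) (test_type : String) : List (List (String × String)) :=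
  let lines := ((PySem.Chars.splitOn (PySem.Chars.strip response.toList) ['\n']).map
      PySem.Chars.strip).filter (· ≠ [])
  (pvParseBlocks test_type.toList lines).map
    (fun d => d.items.map (fun p => (String.mk p.1, String.mk p.2)))

-- ===== PRECONDITION & SPEC =====
def Spec_parse_test_cases_py (response : String) (test_type : String) (out : List (List (String × String))) : Prop := out = parse_test_cases_py_alt response test_type
instance (response : String) (test_type : String) (out : List (List (String × String))) : Decidable (Spec_parse_test_cases_py response test_type out) := by unfold Spec_parse_test_cases_py; infer_instance

-- ===== CLAIM (what is proved, stated in full; the proofs are below) =====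
def Claim_equal_parse_test_cases_py : Prop := ∀ (response : String) (test_type : String), Dom_parse_test_cases_py response test_type → Spec_parse_test_cases_py response test_type (parse_test_cases_py response test_type)

-- ===== LEMMAS AND PROOFS =====

-- emitted list for a finished case
def pvEmit (tt : List Char) (cur : PySem.Dict (List Char) (List Char)) :
    List (PySem.Dict (List Char) (List Char)) :=
  if cur.items.isEmpty then [] else [cur.insert "test_type".toList tt]

-- invariant carried through a block: the current field, when set, is a key of the case
def pvInv (cur : PySem.Dict (List Char) (List Char)) (fld : List Char) : Prop :=
  fld = [] ∨ cur.contains fld = true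

theorem pv_contains_not_empty {cur : PySem.Dict (List Char) (List Char)} {fld : List Char}
    (h : cur.contains fld = true) : cur.items.isEmpty = false := by
  rcases cur with ⟨items⟩
  cases items with
  | nil => simp [PySem.Dict.contains] at h
  | cons p ps => simp

-- A's fold over the raw lines is the cleaned-lines fold of the core step
theorem pv_foldA_clean (tt : List Char) (lines : List (List Char)) (st : pvStateA) :
    lines.foldl (pvStepA tt) st
      = ((lines.map PySem.Chars.strip).filter (· ≠ [])).foldl (pvStepACore tt) st := by
  induction lines generalizing st with
  | nil => rfl
  | cons raw ls ih =>
    simp only [List.foldl_cons, List.map_cons, List.filter_cons]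
    by_cases h : PySem.Chars.strip raw = []
    · simp [pvStepA, h, ih]
    · simp [pvStepA, h, ih]

-- on a marker line A's core step flushes the current case and starts {'title': line}
theorem pv_step_marker (tt : List Char) (tcs : List (PySem.Dict (List Char) (List Char)))
    (cur : PySem.Dict (List Char) (List Char)) (fld line : List Char)
    (hm : pvIsMarker line = true) :
    pvStepACore tt (tcs, cur, fld) line
      = (tcs ++ pvEmit tt cur, (PySem.Dict.empty).insert "title".toList line, []) := by
  have hcond : (PySem.Chars.startswith line "Test Case".toList
      || PySem.Chars.startswith line "Case".toList
      || PySem.Chars.startswith line "Scenario".toList) = pvIsMarker line := by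
    simp [pvIsMarker, pvMarkers, Bool.or_assoc]
  simp only [pvStepACore, hcond, hm, if_true, pvEmit]
  split_ifs <;> simp

-- on a non-marker line A's core step keeps test_cases and performs B's build step
theorem pv_step_eq (tt : List Char) (tcs : List (PySem.Dict (List Char) (List Char)))
    (cur : PySem.Dict (List Char) (List Char)) (fld line : List Char)
    (hinv : pvInv cur fld) (hm : pvIsMarker line = false) :
    pvStepACore tt (tcs, cur, fld) line = (tcs, pvBuildStep (cur, fld) line) := by
  have hcond : (PySem.Chars.startswith line "Test Case".toList
      || PySem.Chars.startswith line "Case".toList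
      || PySem.Chars.startswith line "Scenario".toList) = pvIsMarker line := by
    simp [pvIsMarker, pvMarkers, Bool.or_assoc]
  by_cases hc : PySem.Chars.isIn [':'] line = true
  · simp only [pvStepACore, pvBuildStep, hcond, hm, Bool.false_eq_true, if_false, hc, if_true,
      pvFieldGroups, List.find?]
    split_ifs with h1 h2 h3 <;> simp_all
  · by_cases hfld : fld = []
    · simp only [pvStepACore, pvBuildStep, hcond, hm, Bool.false_eq_true, if_false]
      simp [hc, hfld]
    · have hcont : cur.contains fld = true := hinv.resolve_left hfld
      simp only [pvStepACore, pvBuildStep, hcond, hm, Bool.false_eq_true, if_false]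
      simp [hc, hfld, hcont, pv_contains_not_empty hcont]

theorem pv_step_inv (cur : PySem.Dict (List Char) (List Char)) (fld line : List Char)
    (hinv : pvInv cur fld) :
    pvInv (pvBuildStep (cur, fld) line).1 (pvBuildStep (cur, fld) line).2 := by
  by_cases hc : PySem.Chars.isIn [':'] line = true
  · simp only [pvBuildStep, hc, if_true]
    split
    · simp [pvInv, PySem.Dict.contains_insert_self]
    · exact hinv
  · by_cases hf : fld = []
    · simpa [pvBuildStep, hc, hf] using hinv
    · simp [pvBuildStep, hc, hf, pvInv, PySem.Dict.contains_insert_self]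

-- main block lemma: A's core fold, flushed, emits the current block's case and then
-- parses the remaining blocks exactly as B does
theorem pv_main (tt : List Char) : ∀ (n : Nat) (cls : List (List Char)), cls.length ≤ n →
    ∀ (tcs : List (PySem.Dict (List Char) (List Char)))
      (cur : PySem.Dict (List Char) (List Char)) (fld : List Char), pvInv cur fld →
    (cls.foldl (pvStepACore tt) (tcs, cur, fld)).1
        ++ pvEmit tt (cls.foldl (pvStepACore tt) (tcs, cur, fld)).2.1
      = tcs ++ pvEmit tt ((pvSplitBody cls).1.foldl pvBuildStep (cur, fld)).1
          ++ pvParseBlocks tt (pvSplitBody cls).2 := by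
  intro n
  induction n with
  | zero =>
    intro cls hlen tcs cur fld _
    have : cls = [] := List.eq_nil_of_length_eq_zero (Nat.le_zero.mp hlen)
    subst this
    simp [pvSplitBody, pvParseBlocks, pvEmit]
  | succ n ih =>
    intro cls hlen tcs cur fld hinv
    cases cls with
    | nil => simp [pvSplitBody, pvParseBlocks, pvEmit]
    | cons l ls =>
      have hls : ls.length ≤ n := by simpa using hlen
      by_cases hm : pvIsMarker l = true
      · simp only [List.foldl_cons, pv_step_marker tt tcs cur fld l hm]
        rw [ih ls hls (tcs ++ pvEmit tt cur) ((PySem.Dict.empty).insert "title".toList l) []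
          (Or.inl rfl)]
        have hsb : pvSplitBody (l :: ls) = ([], l :: ls) := by simp [pvSplitBody, hm]
        rw [hsb]
        simp only [pvParseBlocks, pvBuildCase, pvEmit, hm, if_true, List.foldl_nil,
          List.append_assoc]
      · have hmf : pvIsMarker l = false := by simpa using hm
        simp only [List.foldl_cons, pv_step_eq tt tcs cur fld l hinv hmf]
        rw [ih ls hls tcs (pvBuildStep (cur, fld) l).1 (pvBuildStep (cur, fld) l).2
          (pv_step_inv cur fld l hinv)]
        have hsb : pvSplitBody (l :: ls)
            = (l :: (pvSplitBody ls).1, (pvSplitBody ls).2) := by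
          simp [pvSplitBody, hmf]
        rw [hsb]
        simp

-- B's recursion unfolded one block at a time (holds for every line list)
theorem pv_parse_unfold (tt : List Char) (cls : List (List Char)) :
    pvParseBlocks tt cls
      = pvEmit tt ((pvSplitBody cls).1.foldl pvBuildStep (PySem.Dict.empty, ([] : List Char))).1
          ++ pvParseBlocks tt (pvSplitBody cls).2 := by
  cases cls with
  | nil => simp [pvSplitBody, pvParseBlocks, pvEmit, PySem.Dict.empty]
  | cons l ls =>
    by_cases hm : pvIsMarker l = true
    · have hsb : pvSplitBody (l :: ls) = ([], l :: ls) := by simp [pvSplitBody, hm]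
      rw [hsb]
      have : (PySem.Dict.empty : PySem.Dict (List Char) (List Char)).items.isEmpty = true := by
        simp [PySem.Dict.empty]
      simp [pvEmit, this]
    · have hmf : pvIsMarker l = false := by simpa using hm
      have hsb : pvSplitBody (l :: ls) = (l :: (pvSplitBody ls).1, (pvSplitBody ls).2) := by
        simp [pvSplitBody, hmf]
      rw [hsb]
      simp only [pvParseBlocks, pvBuildCase, pvEmit, hmf, Bool.false_eq_true, if_false,
        List.foldl_cons]

-- ===== VERDICT (by name: the statement is the Claim_ definition above) =====
theorem parse_test_cases_py_spec : Claim_equal_parse_test_cases_py := by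
  intro response test_type _
  unfold Spec_parse_test_cases_py parse_test_cases_py parse_test_cases_py_alt
  dsimp only
  rw [pv_foldA_clean]
  set cls := ((PySem.Chars.splitOn (PySem.Chars.strip response.toList) ['\n']).map
      PySem.Chars.strip).filter (· ≠ []) with hcls
  have hflush : (if (cls.foldl (pvStepACore test_type.toList)
        (([] : List (PySem.Dict (List Char) (List Char))), PySem.Dict.empty, ([] : List Char))).2.1.items.isEmpty then
        (cls.foldl (pvStepACore test_type.toList) ([], PySem.Dict.empty, [])).1
      else (cls.foldl (pvStepACore test_type.toList) ([], PySem.Dict.empty, [])).1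
        ++ [(cls.foldl (pvStepACore test_type.toList)
              ([], PySem.Dict.empty, [])).2.1.insert "test_type".toList test_type.toList])
      = (cls.foldl (pvStepACore test_type.toList) ([], PySem.Dict.empty, [])).1
        ++ pvEmit test_type.toList
            (cls.foldl (pvStepACore test_type.toList) ([], PySem.Dict.empty, [])).2.1 := by
    unfold pvEmit; split_ifs <;> simp
  rw [hflush, pv_main test_type.toList cls.length cls (Nat.le_refl _) [] PySem.Dict.empty []
    (Or.inl rfl), List.nil_append, ← pv_parse_unfold]
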